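-- pv_equiv track=rewrite | github.com/ElliottYan/rllm-terminal | rllm_ext/environments/predictive_tool_env.py | _concatenate_tool_outputs
-- ===== SOURCE A (Python) =====
-- from typing import Any
--
-- def _concatenate_tool_outputs(tool_outputs: Any, tool_calls: Any) -> str:
--     """
--     Concatenate current-step tool outputs in deterministic order.
--
--     Order policy:
--     1) IDs in the current tool call list order
--     2) remaining outputs ordered by key
--     """
--     if not isinstance(tool_outputs, dict) or not tool_outputs:
--         return ""
--
--     output_map = {str(k): str(v) for k, v in tool_outputs.items()}
--     ordered_values: list[str] = []
--     used_ids: set[str] = set()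
--
--     if isinstance(tool_calls, list):
--         for tool_call in tool_calls:
--             if not isinstance(tool_call, dict):
--                 continue
--             tool_call_id = tool_call.get("id")
--             if tool_call_id is None:
--                 continue
--             tool_call_id = str(tool_call_id)
--             if tool_call_id in output_map and tool_call_id not in used_ids:
--                 ordered_values.append(output_map[tool_call_id])
--                 used_ids.add(tool_call_id)
--
--     for tool_call_id in sorted(output_map.keys()):
--         if tool_call_id in used_ids:
--             continue
--         ordered_values.append(output_map[tool_call_id])
--
--     return " ".join(ordered_values).strip()
-- ===== SOURCE B (Python) =====
-- from typing import Any
--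
-- def _concatenate_tool_outputs(tool_outputs: Any, tool_calls: Any) -> str:
--     """Same result as A via a single composite-key sort: rank valid call ids by
--     first occurrence, then sort all output keys by (rank, key) and join."""
--     if not isinstance(tool_outputs, dict) or not tool_outputs:
--         return ""
--
--     output_map = {str(k): str(v) for k, v in tool_outputs.items()}
--     big = len(output_map)
--
--     rank: dict[str, int] = {}
--     if isinstance(tool_calls, list):
--         for tool_call in tool_calls:
--             if not isinstance(tool_call, dict):
--                 continue
--             tool_call_id = tool_call.get("id")
--             if tool_call_id is None:
--                 continue
--             tool_call_id = str(tool_call_id)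
--             if tool_call_id in output_map and tool_call_id not in rank:
--                 rank[tool_call_id] = len(rank)
--
--     ordered_keys = sorted(output_map, key=lambda k: (rank.get(k, big), k))
--     return " ".join(output_map[k] for k in ordered_keys).strip()
-- ===== Notes on version B (the rewrite author's own statement) =====
-- stated objective: alternative
-- what changed: A's two-phase traversal (collect values in tool-call order with a used-id set, then a second pass appending the remaining values in sorted key order) is replaced by one first-occurrence rank dict plus a single composite-key sort of all output keys by (rank or sentinel, key).
import Mathlib
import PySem

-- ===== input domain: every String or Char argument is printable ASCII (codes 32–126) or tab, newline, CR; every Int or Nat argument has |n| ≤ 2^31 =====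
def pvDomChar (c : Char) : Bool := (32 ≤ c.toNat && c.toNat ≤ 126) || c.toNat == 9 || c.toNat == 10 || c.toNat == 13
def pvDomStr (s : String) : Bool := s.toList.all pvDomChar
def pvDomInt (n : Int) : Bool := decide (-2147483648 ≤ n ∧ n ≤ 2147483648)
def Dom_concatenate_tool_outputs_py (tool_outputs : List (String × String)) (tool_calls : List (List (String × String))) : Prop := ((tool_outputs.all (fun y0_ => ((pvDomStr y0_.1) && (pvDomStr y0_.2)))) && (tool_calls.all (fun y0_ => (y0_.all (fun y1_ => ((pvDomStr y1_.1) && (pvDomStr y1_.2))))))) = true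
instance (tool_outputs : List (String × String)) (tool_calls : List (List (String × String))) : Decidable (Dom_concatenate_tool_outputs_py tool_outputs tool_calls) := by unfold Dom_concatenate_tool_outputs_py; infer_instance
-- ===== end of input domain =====

-- B replaces A's two-phase traversal (ordered-collect by call order, then a second
-- pass over the sorted remaining keys) by ONE composite-key sort: a first-occurrence
-- rank dict, then every key sorted by the tuple (rank or sentinel, key). Same result.

-- ===== PORT A =====
-- loop body of A's first for-loop (state: ordered_values, used_ids)
def aStep (output_map : PySem.Dict String String) (st : List String × PySem.Set String)
    (tool_call : List (String × String)) : List String × PySem.Set String :=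
  match (PySem.Dict.ofList tool_call).get? "id" with
  | none => st
  | some tool_call_id =>
    if output_map.contains tool_call_id && !(PySem.Set.contains st.2 tool_call_id) then
      (st.1 ++ [output_map.getD tool_call_id ""], PySem.Set.add st.2 tool_call_id)
    else st

def concatenate_tool_outputs_py (tool_outputs : List (String × String)) (tool_calls : List (List (String × String))) : String :=
  if tool_outputs.isEmpty then "" else
    let output_map := PySem.Dict.ofList tool_outputs
    let st := tool_calls.foldl (aStep output_map) ([], PySem.Set.empty)
    let ordered_values := (PySem.List.sorted output_map.keys (fun k => k) false).foldl
        (fun acc tool_call_id =>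
          if PySem.Set.contains st.2 tool_call_id then acc
          else acc ++ [output_map.getD tool_call_id ""]) st.1
    PySem.Str.strip (PySem.Str.join " " ordered_values)

-- ===== PORT B =====
-- loop body of B's single pass building the first-occurrence rank dict
def bStep (output_map : PySem.Dict String String) (r : PySem.Dict String Int)
    (tool_call : List (String × String)) : PySem.Dict String Int :=
  match (PySem.Dict.ofList tool_call).get? "id" with
  | none => r
  | some tool_call_id =>
    if output_map.contains tool_call_id && !(r.contains tool_call_id) then
      r.insert tool_call_id (r.size : Int)
    else r

-- B's composite sort key (rank.get(k, big), k); Lex = Python's tuple comparison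
def lexKey (rank : PySem.Dict String Int) (big : Int) (k : String) : Lex (Int × String) :=
  toLex (rank.getD k big, k)

def concatenate_tool_outputs_py_alt (tool_outputs : List (String × String)) (tool_calls : List (List (String × String))) : String :=
  if tool_outputs.isEmpty then "" else
    let output_map := PySem.Dict.ofList tool_outputs
    let big : Int := (output_map.size : Int)
    let rank := tool_calls.foldl (bStep output_map) PySem.Dict.empty
    let ordered_keys := PySem.List.sorted output_map.keys (lexKey rank big) false
    PySem.Str.strip (PySem.Str.join " " (ordered_keys.map (fun k => output_map.getD k "")))

-- ===== PRECONDITION & SPEC =====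
def Spec_concatenate_tool_outputs_py (tool_outputs : List (String × String)) (tool_calls : List (List (String × String))) (out : String) : Prop := out = concatenate_tool_outputs_py_alt tool_outputs tool_calls
instance (tool_outputs : List (String × String)) (tool_calls : List (List (String × String))) (out : String) : Decidable (Spec_concatenate_tool_outputs_py tool_outputs tool_calls out) := by unfold Spec_concatenate_tool_outputs_py; infer_instance

-- ===== CLAIM (what is proved, stated in full; the proofs are below) =====
def Claim_equal_concatenate_tool_outputs_py : Prop := ∀ (tool_outputs : List (String × String)) (tool_calls : List (List (String × String))), Dom_concatenate_tool_outputs_py tool_outputs tool_calls → Spec_concatenate_tool_outputs_py tool_outputs tool_calls (concatenate_tool_outputs_py tool_outputs tool_calls)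

-- ===== LEMMAS AND PROOFS =====

-- Set-membership test on a rank dict's key list = the dict's own contains
lemma set_contains_keys (r : PySem.Dict String Int) (k : String) :
    PySem.Set.contains r.keys k = r.contains k := by
  rw [Bool.eq_iff_iff]
  simp [PySem.Set.contains, PySem.Dict.contains_iff_mem_keys]

-- the invariant B's rank dict maintains (w.r.t. the output map d)
def RankInv (d : PySem.Dict String String) (r : PySem.Dict String Int) : Prop :=
  r.keys.Nodup ∧ (∀ k ∈ r.keys, d.contains k = true) ∧
    r.values = (List.range r.size).map (fun n : Nat => (n : Int))

lemma step_eq (d : PySem.Dict String String) (r : PySem.Dict String Int)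
    (tc : List (String × String)) (h : RankInv d r) :
    aStep d (r.keys.map (fun k => d.getD k ""), r.keys) tc =
      ((bStep d r tc).keys.map (fun k => d.getD k ""), (bStep d r tc).keys)
    ∧ RankInv d (bStep d r tc) := by
  obtain ⟨hn, hs, hv⟩ := h
  unfold aStep bStep
  cases hid : (PySem.Dict.ofList tc).get? "id" with
  | none => exact ⟨rfl, hn, hs, hv⟩
  | some id =>
    dsimp only
    rw [set_contains_keys]
    rcases Bool.eq_false_or_eq_true (d.contains id && !(r.contains id)) with hcond | hcond
    · rw [if_pos hcond, if_pos hcond]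
      obtain ⟨hdc, hrc'⟩ := Bool.and_eq_true_iff.mp hcond
      have hrc : r.contains id = false := by simpa using hrc'
      have hmem : id ∉ r.keys := fun hm => by
        rw [(PySem.Dict.contains_iff_mem_keys r id).mpr hm] at hrc
        exact Bool.noConfusion hrc
      have hins : (r.insert id (r.size : Int)).items = r.items ++ [(id, (r.size : Int))] := by
        simp [PySem.Dict.insert, hrc]
      have hkeys : (r.insert id (r.size : Int)).keys = r.keys ++ [id] := by
        simp [PySem.Dict.keys, hins]
      have hadd : PySem.Set.add r.keys id = r.keys ++ [id] := by
        simp [PySem.Set.add, hmem]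
      refine ⟨?_, ?_, ?_, ?_⟩
      · simp [hkeys, hadd]
      · rw [hkeys]
        exact hn.append (List.nodup_singleton id) (by rw [List.disjoint_singleton]; exact hmem)
      · intro k hk
        rw [hkeys] at hk
        rcases List.mem_append.mp hk with h1 | h1
        · exact hs k h1
        · rwa [List.mem_singleton.mp h1]
      · have hvals : (r.insert id (r.size : Int)).values = r.values ++ [(r.size : Int)] := by
          simp [PySem.Dict.values, hins]
        have hsz : (r.insert id (r.size : Int)).size = r.size + 1 := by
          have h1 := congrArg List.length hins
          simpa [PySem.Dict.size] using h1
        rw [hvals, hsz, hv, List.range_succ]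
        simp
    · rw [if_neg (by simp [hcond]), if_neg (by simp [hcond])]
      exact ⟨rfl, hn, hs, hv⟩

lemma loop_eq (d : PySem.Dict String String) (tcs : List (List (String × String)))
    (r : PySem.Dict String Int) (h : RankInv d r) :
    tcs.foldl (aStep d) (r.keys.map (fun k => d.getD k ""), r.keys) =
      ((tcs.foldl (bStep d) r).keys.map (fun k => d.getD k ""), (tcs.foldl (bStep d) r).keys)
    ∧ RankInv d (tcs.foldl (bStep d) r) := by
  induction tcs generalizing r with
  | nil => exact ⟨rfl, h⟩
  | cons tc tcs ih =>
    obtain ⟨hstep, hinv⟩ := step_eq d r tc h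
    simpa [List.foldl_cons, hstep] using ih (bStep d r tc) hinv

-- ranked keys carry getD-values 0,1,2,… (in key order)
lemma keys_map_getD (d : PySem.Dict String String) (r : PySem.Dict String Int)
    (big : Int) (h : RankInv d r) :
    r.keys.map (fun k => r.getD k big) = (List.range r.size).map (fun n : Nat => (n : Int)) := by
  obtain ⟨hn, _, hv⟩ := h
  have hitems := PySem.Dict.items_eq_map_keys r hn big
  calc r.keys.map (fun k => r.getD k big)
      = (r.keys.map (fun k => (k, r.getD k big))).map (fun p => p.2) := by
        simp [List.map_map, Function.comp]
    _ = r.items.map (fun p => p.2) := by rw [← hitems]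
    _ = (List.range r.size).map (fun n : Nat => (n : Int)) := by
        rw [← PySem.Dict.values]; exact hv

lemma getD_lt_of_mem (d : PySem.Dict String String) (r : PySem.Dict String Int)
    (big : Int) (h : RankInv d r) (hbig : (r.size : Int) ≤ big)
    (k : String) (hk : k ∈ r.keys) : r.getD k big < big := by
  have hm : r.getD k big ∈ r.keys.map (fun k => r.getD k big) := List.mem_map_of_mem hk
  rw [keys_map_getD d r big h] at hm
  obtain ⟨n, hn, he⟩ := List.mem_map.mp hm
  rw [← he]
  have : n < r.size := List.mem_range.mp hn
  omega

lemma getD_of_not_mem (r : PySem.Dict String Int) (big : Int) (k : String)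
    (hk : r.contains k = false) : r.getD k big = big := by
  simp [PySem.Dict.getD, (PySem.Dict.get?_eq_none_iff_contains r k).mpr hk]

-- the heart: the composite-key sort = ranked keys (in rank order) ++ sorted unranked keys
lemma sorted_split (d : PySem.Dict String String) (r : PySem.Dict String Int)
    (hd : d.keys.Nodup) (h : RankInv d r) :
    PySem.List.sorted d.keys (lexKey r (d.size : Int)) false =
      r.keys ++ (PySem.List.sorted d.keys (fun k => k) false).filter (fun k => !(r.contains k)) := by
  obtain ⟨hn, hs, hv⟩ := h
  have hsub : r.keys ⊆ d.keys := fun k hk => (PySem.Dict.contains_iff_mem_keys d k).mp (hs k hk)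
  have hbig : (r.size : Int) ≤ (d.size : Int) := by
    have := (List.subperm_of_subset hn hsub).length_le
    simp only [PySem.Dict.keys, List.length_map] at this
    exact_mod_cast this
  have hSperm : (PySem.List.sorted d.keys (fun k => k) false).Perm d.keys :=
    PySem.List.sorted_perm d.keys (fun k => k) false
  apply PySem.List.sorted_eq_of_perm_of_pairwise_lt
  · -- permutation
    have h1 : ((PySem.List.sorted d.keys (fun k => k) false).filter (fun k => !(r.contains k))).Perm
        (d.keys.filter (fun k => !(r.contains k))) := hSperm.filter _
    have h2 : r.keys.Perm (d.keys.filter (fun k => r.contains k)) := by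
      refine (List.perm_ext_iff_of_nodup hn (hd.filter _)).mpr (fun k => ?_)
      simp only [List.mem_filter]
      constructor
      · intro hk; exact ⟨hsub hk, (PySem.Dict.contains_iff_mem_keys r k).mpr hk⟩
      · intro ⟨_, hc⟩; exact (PySem.Dict.contains_iff_mem_keys r k).mp hc
    exact (h2.append h1).trans (List.filter_append_perm _ d.keys)
  · -- strict pairwise increase under the composite key
    rw [List.pairwise_append]
    refine ⟨?_, ?_, ?_⟩
    · -- within the ranked keys: strictly increasing rank
      have hmap : (r.keys.map (fun k => r.getD k (d.size : Int))).Pairwise (· < ·) := by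
        rw [keys_map_getD d r _ ⟨hn, hs, hv⟩]
        exact List.pairwise_lt_range.map _ (fun a b hab => by exact_mod_cast hab)
      have := (List.pairwise_map).mp hmap
      refine this.imp ?_
      intro a b hab
      unfold lexKey
      rw [Prod.Lex.lt_iff']
      exact ⟨le_of_lt hab, fun he => absurd he (ne_of_lt hab)⟩
    · -- within the unranked keys: key sentinel equal, string order strict
      have hnodup : (PySem.List.sorted d.keys (fun k => k) false).Nodup := hSperm.symm.nodup hd
      have hle : (PySem.List.sorted d.keys (fun k => k) false).Pairwise (fun a b => a ≤ b) :=
        PySem.List.sorted_pairwise d.keys (fun k => k)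
      have hlt : (PySem.List.sorted d.keys (fun k => k) false).Pairwise (· < ·) :=
        (hle.and hnodup).imp (fun h => lt_of_le_of_ne h.1 h.2)
      have hflt : ((PySem.List.sorted d.keys (fun k => k) false).filter
          (fun k => !(r.contains k))).Pairwise (· < ·) := hlt.filter _
      refine hflt.imp_of_mem ?_
      intro a b ha hb hab
      have hca : r.contains a = false := by simpa using (List.mem_filter.mp ha).2
      have hcb : r.contains b = false := by simpa using (List.mem_filter.mp hb).2
      unfold lexKey
      rw [getD_of_not_mem r _ a hca, getD_of_not_mem r _ b hcb, Prod.Lex.lt_iff']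
      exact ⟨le_refl _, fun _ => hab⟩
    · -- ranked before unranked: rank < sentinel
      intro a ha b hb
      have hcb : r.contains b = false := by simpa using (List.mem_filter.mp hb).2
      unfold lexKey
      rw [getD_of_not_mem r _ b hcb, Prod.Lex.lt_iff']
      have hlt := getD_lt_of_mem d r (d.size : Int) ⟨hn, hs, hv⟩ hbig a ha
      exact ⟨le_of_lt hlt, fun he => absurd he (ne_of_lt hlt)⟩

-- ===== VERDICT (by name: the statement is the Claim_ definition above) =====
theorem concatenate_tool_outputs_py_spec : Claim_equal_concatenate_tool_outputs_py := by
  intro tool_outputs tool_calls _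
  unfold Spec_concatenate_tool_outputs_py
  unfold concatenate_tool_outputs_py concatenate_tool_outputs_py_alt
  by_cases hemp : tool_outputs.isEmpty
  · simp [hemp]
  · simp only [hemp, if_neg, Bool.not_eq_true]
    set d := PySem.Dict.ofList tool_outputs with hd
    have hdn : d.keys.Nodup := PySem.Dict.nodup_keys_ofList tool_outputs
    have hinv0 : RankInv d PySem.Dict.empty := by
      refine ⟨?_, ?_, ?_⟩ <;> simp [PySem.Dict.empty, PySem.Dict.keys, PySem.Dict.values, PySem.Dict.size]
    have h0 : (([], PySem.Set.empty) : List String × PySem.Set String) =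
        ((PySem.Dict.empty : PySem.Dict String Int).keys.map (fun k => d.getD k ""),
          (PySem.Dict.empty : PySem.Dict String Int).keys) := by
      simp [PySem.Dict.empty, PySem.Dict.keys, PySem.Set.empty]
    rw [h0]
    obtain ⟨hfold, hinv⟩ := loop_eq d tool_calls PySem.Dict.empty hinv0
    rw [hfold]
    set r := tool_calls.foldl (bStep d) PySem.Dict.empty with hr
    -- the second loop of A as filter-map, then the key identity
    have hsecond : ∀ (init : List String),
        (PySem.List.sorted d.keys (fun k => k) false).foldl
          (fun acc k => if PySem.Set.contains r.keys k then acc else acc ++ [d.getD k ""]) init =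
        init ++ ((PySem.List.sorted d.keys (fun k => k) false).filter
          (fun k => !(r.contains k))).map (fun k => d.getD k "") := by
      intro init
      have hfun : (fun (acc : List String) k =>
          if PySem.Set.contains r.keys k then acc else acc ++ [d.getD k ""]) =
          (fun acc k => if (!(r.contains k)) = true then acc ++ [d.getD k ""] else acc) := by
        funext acc k
        rw [set_contains_keys]
        cases r.contains k <;> simp
      rw [hfun, PySem.List.foldl_append_if]
    rw [hsecond]
    rw [sorted_split d r hdn hinv]
    simp [List.map_append]
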